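-- pv_equiv track=rewrite | github.com/YACINBK/ux-insight-platform | backend/fastapi_vision/ocr_enhancer.py | enhance_element_classification
-- ===== SOURCE A (Python) =====
-- from typing import List, Dict, Any, Tuple
--
-- def enhance_element_classification(element_class: str, text: str, bbox: List[float]) -> str:
--     """
--     Enhance element classification based on extracted text and context
--
--     Args:
--         element_class: Original class from Vision API
--         text: Extracted text from OCR
--         bbox: Bounding box coordinates
--
--     Returns:
--         Enhanced, specific classification
--     """
--     text_lower = text.lower().strip()
--
--     # Button classifications
--     if element_class == "button":
--         if any(word in text_lower for word in ["submit", "login", "sign in", "log in"]):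
--             return "submit_button"
--         elif any(word in text_lower for word in ["cancel", "close", "exit"]):
--             return "cancel_button"
--         elif any(word in text_lower for word in ["save", "update", "edit"]):
--             return "save_button"
--         elif any(word in text_lower for word in ["delete", "remove", "trash"]):
--             return "delete_button"
--         elif any(word in text_lower for word in ["next", "continue", "proceed"]):
--             return "next_button"
--         elif any(word in text_lower for word in ["back", "previous", "return"]):
--             return "back_button"
--         elif any(word in text_lower for word in ["search", "find", "lookup"]):
--             return "search_button"
--         elif any(word in text_lower for word in ["menu", "hamburger", "☰"]):
--             return "menu_button"
--         elif any(word in text_lower for word in ["home", "main", "dashboard"]):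
--             return "home_button"
--         elif text_lower:
--             return f"button_{text_lower.replace(' ', '_')}"
--         else:
--             return "generic_button"
--
--     # Input field classifications
--     elif element_class == "textbox" or element_class == "input":
--         if any(word in text_lower for word in ["email", "e-mail", "@"]):
--             return "email_input"
--         elif any(word in text_lower for word in ["password", "pass", "pwd"]):
--             return "password_input"
--         elif any(word in text_lower for word in ["username", "user", "login"]):
--             return "username_input"
--         elif any(word in text_lower for word in ["search", "find", "query"]):
--             return "search_input"
--         elif any(word in text_lower for word in ["name", "full name"]):
--             return "name_input"
--         elif any(word in text_lower for word in ["phone", "tel", "mobile"]):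
--             return "phone_input"
--         elif any(word in text_lower for word in ["address", "street", "city"]):
--             return "address_input"
--         elif text_lower:
--             return f"input_{text_lower.replace(' ', '_')}"
--         else:
--             return "generic_input"
--
--     # Link classifications
--     elif element_class == "link":
--         if any(word in text_lower for word in ["home", "main", "dashboard"]):
--             return "home_link"
--         elif any(word in text_lower for word in ["about", "info", "help"]):
--             return "info_link"
--         elif any(word in text_lower for word in ["contact", "support", "help"]):
--             return "contact_link"
--         elif any(word in text_lower for word in ["login", "sign in"]):
--             return "login_link"
--         elif any(word in text_lower for word in ["register", "sign up", "join"]):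
--             return "register_link"
--         elif any(word in text_lower for word in ["profile", "account", "settings"]):
--             return "profile_link"
--         elif text_lower:
--             return f"link_{text_lower.replace(' ', '_')}"
--         else:
--             return "generic_link"
--
--     # Heading classifications
--     elif element_class == "heading":
--         if any(word in text_lower for word in ["welcome", "hello", "hi"]):
--             return "welcome_heading"
--         elif any(word in text_lower for word in ["login", "sign in"]):
--             return "login_heading"
--         elif any(word in text_lower for word in ["register", "sign up"]):
--             return "register_heading"
--         elif any(word in text_lower for word in ["profile", "account"]):
--             return "profile_heading"
--         elif any(word in text_lower for word in ["settings", "preferences"]):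
--             return "settings_heading"
--         elif text_lower:
--             return f"heading_{text_lower.replace(' ', '_')}"
--         else:
--             return "generic_heading"
--
--     # Default: return original class if no enhancement possible
--     return element_class
-- ===== SOURCE B (Python) =====
-- # Inverted keyword index: instead of walking ordered keyword groups per class, map each
-- # keyword directly to the priority of its rule, collect the priorities of ALL keywords
-- # occurring in the text, take the minimum, and compose the label textually as
-- # "<prefix>_<suffix>".  The duplicate keyword "help" of the link class (it appears in
-- # both the info and contact rules of the original, where only the earlier can ever fire)
-- # is indexed once with its effective (smaller) priority.
--
-- _INPUT_ENTRY = (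
--     "input",
--     {"email": 0, "e-mail": 0, "@": 0,
--      "password": 1, "pass": 1, "pwd": 1,
--      "username": 2, "user": 2, "login": 2,
--      "search": 3, "find": 3, "query": 3,
--      "name": 4, "full name": 4,
--      "phone": 5, "tel": 5, "mobile": 5,
--      "address": 6, "street": 6, "city": 6},
--     ["email", "password", "username", "search", "name", "phone", "address"],
-- )
--
-- _RULES = {
--     "button": (
--         "button",
--         {"submit": 0, "login": 0, "sign in": 0, "log in": 0,
--          "cancel": 1, "close": 1, "exit": 1,
--          "save": 2, "update": 2, "edit": 2,
--          "delete": 3, "remove": 3, "trash": 3,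
--          "next": 4, "continue": 4, "proceed": 4,
--          "back": 5, "previous": 5, "return": 5,
--          "search": 6, "find": 6, "lookup": 6,
--          "menu": 7, "hamburger": 7, "\u2630": 7,
--          "home": 8, "main": 8, "dashboard": 8},
--         ["submit", "cancel", "save", "delete", "next", "back", "search", "menu", "home"],
--     ),
--     "textbox": _INPUT_ENTRY,
--     "input": _INPUT_ENTRY,
--     "link": (
--         "link",
--         {"home": 0, "main": 0, "dashboard": 0,
--          "about": 1, "info": 1, "help": 1,
--          "contact": 2, "support": 2,
--          "login": 3, "sign in": 3,
--          "register": 4, "sign up": 4, "join": 4,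
--          "profile": 5, "account": 5, "settings": 5},
--         ["home", "info", "contact", "login", "register", "profile"],
--     ),
--     "heading": (
--         "heading",
--         {"welcome": 0, "hello": 0, "hi": 0,
--          "login": 1, "sign in": 1,
--          "register": 2, "sign up": 2,
--          "profile": 3, "account": 3,
--          "settings": 4, "preferences": 4},
--         ["welcome", "login", "register", "profile", "settings"],
--     ),
-- }
--
--
-- def enhance_element_classification(element_class, text, bbox):
--     t = text.lower().strip()
--     entry = _RULES.get(element_class)
--     if entry is None:
--         return element_class
--     suffix, priority_of, prefixes = entry
--     hits = [p for kw, p in priority_of.items() if kw in t]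
--     if hits:
--         return f"{prefixes[min(hits)]}_{suffix}"
--     if t:
--         return f"{suffix}_{t.replace(' ', '_')}"
--     return f"generic_{suffix}"
-- ===== Notes on version B (the rewrite author's own statement) =====
-- stated objective: alternative
-- what changed: Replaces A's four copy-pasted if/elif ladders over ordered keyword groups by an inverted index: each keyword maps directly to its rule's priority, the priorities of all keywords occurring in the text are collected and their minimum selects a prefix that is composed textually with the class suffix into the label; the duplicate 'help' keyword of the link class is indexed once at its effective priority.
import Mathlib
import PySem

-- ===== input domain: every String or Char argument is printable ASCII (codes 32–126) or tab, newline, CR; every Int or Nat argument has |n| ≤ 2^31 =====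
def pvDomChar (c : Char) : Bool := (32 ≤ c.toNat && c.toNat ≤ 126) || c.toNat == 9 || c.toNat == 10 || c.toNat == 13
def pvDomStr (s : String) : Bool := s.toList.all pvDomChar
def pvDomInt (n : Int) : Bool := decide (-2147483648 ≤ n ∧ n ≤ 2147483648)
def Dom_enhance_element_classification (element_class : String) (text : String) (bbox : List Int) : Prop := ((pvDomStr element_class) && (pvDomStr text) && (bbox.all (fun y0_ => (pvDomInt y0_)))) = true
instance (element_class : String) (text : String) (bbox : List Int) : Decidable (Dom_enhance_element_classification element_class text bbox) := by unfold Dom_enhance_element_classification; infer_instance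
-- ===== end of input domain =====

-- B replaces A's four if/elif keyword-group ladders by an inverted index (keyword → rule priority):
-- it collects the priorities of all keywords found in the text, takes their minimum, and composes
-- the label textually as "<prefix>_<suffix>"; objective: simpler/alternative.

-- ===== PORT A =====
def enhance_element_classification (element_class : String) (text : String) (bbox : List Int) : String :=
  let text_lower := PySem.Str.strip (PySem.Str.lower text)
  if element_class == "button" then
    if (["submit", "login", "sign in", "log in"] : List String).any (fun w => PySem.Str.isIn w text_lower) then "submit_button"
    else if (["cancel", "close", "exit"] : List String).any (fun w => PySem.Str.isIn w text_lower) then "cancel_button"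
    else if (["save", "update", "edit"] : List String).any (fun w => PySem.Str.isIn w text_lower) then "save_button"
    else if (["delete", "remove", "trash"] : List String).any (fun w => PySem.Str.isIn w text_lower) then "delete_button"
    else if (["next", "continue", "proceed"] : List String).any (fun w => PySem.Str.isIn w text_lower) then "next_button"
    else if (["back", "previous", "return"] : List String).any (fun w => PySem.Str.isIn w text_lower) then "back_button"
    else if (["search", "find", "lookup"] : List String).any (fun w => PySem.Str.isIn w text_lower) then "search_button"
    else if (["menu", "hamburger", "☰"] : List String).any (fun w => PySem.Str.isIn w text_lower) then "menu_button"
    else if (["home", "main", "dashboard"] : List String).any (fun w => PySem.Str.isIn w text_lower) then "home_button"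
    else if text_lower != "" then "button_" ++ PySem.Str.replace text_lower " " "_"
    else "generic_button"
  else if element_class == "textbox" || element_class == "input" then
    if (["email", "e-mail", "@"] : List String).any (fun w => PySem.Str.isIn w text_lower) then "email_input"
    else if (["password", "pass", "pwd"] : List String).any (fun w => PySem.Str.isIn w text_lower) then "password_input"
    else if (["username", "user", "login"] : List String).any (fun w => PySem.Str.isIn w text_lower) then "username_input"
    else if (["search", "find", "query"] : List String).any (fun w => PySem.Str.isIn w text_lower) then "search_input"
    else if (["name", "full name"] : List String).any (fun w => PySem.Str.isIn w text_lower) then "name_input"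
    else if (["phone", "tel", "mobile"] : List String).any (fun w => PySem.Str.isIn w text_lower) then "phone_input"
    else if (["address", "street", "city"] : List String).any (fun w => PySem.Str.isIn w text_lower) then "address_input"
    else if text_lower != "" then "input_" ++ PySem.Str.replace text_lower " " "_"
    else "generic_input"
  else if element_class == "link" then
    if (["home", "main", "dashboard"] : List String).any (fun w => PySem.Str.isIn w text_lower) then "home_link"
    else if (["about", "info", "help"] : List String).any (fun w => PySem.Str.isIn w text_lower) then "info_link"
    else if (["contact", "support", "help"] : List String).any (fun w => PySem.Str.isIn w text_lower) then "contact_link"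
    else if (["login", "sign in"] : List String).any (fun w => PySem.Str.isIn w text_lower) then "login_link"
    else if (["register", "sign up", "join"] : List String).any (fun w => PySem.Str.isIn w text_lower) then "register_link"
    else if (["profile", "account", "settings"] : List String).any (fun w => PySem.Str.isIn w text_lower) then "profile_link"
    else if text_lower != "" then "link_" ++ PySem.Str.replace text_lower " " "_"
    else "generic_link"
  else if element_class == "heading" then
    if (["welcome", "hello", "hi"] : List String).any (fun w => PySem.Str.isIn w text_lower) then "welcome_heading"
    else if (["login", "sign in"] : List String).any (fun w => PySem.Str.isIn w text_lower) then "login_heading"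
    else if (["register", "sign up"] : List String).any (fun w => PySem.Str.isIn w text_lower) then "register_heading"
    else if (["profile", "account"] : List String).any (fun w => PySem.Str.isIn w text_lower) then "profile_heading"
    else if (["settings", "preferences"] : List String).any (fun w => PySem.Str.isIn w text_lower) then "settings_heading"
    else if text_lower != "" then "heading_" ++ PySem.Str.replace text_lower " " "_"
    else "generic_heading"
  else element_class

-- ===== PORT B =====
-- Source B: _INPUT_ENTRY (the dict keyword → rule priority is the association list, in literal order)
def pvInputEntry : String × List (String × Int) × List String :=
  ("input",
   [("email", 0), ("e-mail", 0), ("@", 0),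
    ("password", 1), ("pass", 1), ("pwd", 1),
    ("username", 2), ("user", 2), ("login", 2),
    ("search", 3), ("find", 3), ("query", 3),
    ("name", 4), ("full name", 4),
    ("phone", 5), ("tel", 5), ("mobile", 5),
    ("address", 6), ("street", 6), ("city", 6)],
   ["email", "password", "username", "search", "name", "phone", "address"])

-- Source B: _RULES
def pvRules : PySem.Dict String (String × List (String × Int) × List String) :=
  PySem.Dict.mk
    [("button",
      ("button",
       [("submit", 0), ("login", 0), ("sign in", 0), ("log in", 0),
        ("cancel", 1), ("close", 1), ("exit", 1),
        ("save", 2), ("update", 2), ("edit", 2),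
        ("delete", 3), ("remove", 3), ("trash", 3),
        ("next", 4), ("continue", 4), ("proceed", 4),
        ("back", 5), ("previous", 5), ("return", 5),
        ("search", 6), ("find", 6), ("lookup", 6),
        ("menu", 7), ("hamburger", 7), ("☰", 7),
        ("home", 8), ("main", 8), ("dashboard", 8)],
       ["submit", "cancel", "save", "delete", "next", "back", "search", "menu", "home"])),
     ("textbox", pvInputEntry),
     ("input", pvInputEntry),
     ("link",
      ("link",
       [("home", 0), ("main", 0), ("dashboard", 0),
        ("about", 1), ("info", 1), ("help", 1),
        ("contact", 2), ("support", 2),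
        ("login", 3), ("sign in", 3),
        ("register", 4), ("sign up", 4), ("join", 4),
        ("profile", 5), ("account", 5), ("settings", 5)],
       ["home", "info", "contact", "login", "register", "profile"])),
     ("heading",
      ("heading",
       [("welcome", 0), ("hello", 0), ("hi", 0),
        ("login", 1), ("sign in", 1),
        ("register", 2), ("sign up", 2),
        ("profile", 3), ("account", 3),
        ("settings", 4), ("preferences", 4)],
       ["welcome", "login", "register", "profile", "settings"]))]

def enhance_element_classification_alt (element_class : String) (text : String) (bbox : List Int) : String :=
  let t := PySem.Str.strip (PySem.Str.lower text)
  match PySem.Dict.get? pvRules element_class with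
  | none => element_class
  | some (suffix, priority_of, prefixes) =>
    -- hits = [p for kw, p in priority_of.items() if kw in t]
    let hits := (priority_of.filter (fun kp => PySem.Str.isIn kp.1 t)).map Prod.snd
    -- if hits: return f"{prefixes[min(hits)]}_{suffix}"  (min(hits) is always a valid index, so
    -- the list access is ported with a default that is never used)
    match PySem.List.min? hits (fun x => x) with
    | some m => (PySem.List.pyGet? prefixes m).getD "" ++ "_" ++ suffix
    | none => if t != "" then suffix ++ "_" ++ PySem.Str.replace t " " "_" else "generic_" ++ suffix

-- ===== PRECONDITION & SPEC =====
def Spec_enhance_element_classification (element_class : String) (text : String) (bbox : List Int) (out : String) : Prop := out = enhance_element_classification_alt element_class text bbox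
instance (element_class : String) (text : String) (bbox : List Int) (out : String) : Decidable (Spec_enhance_element_classification element_class text bbox out) := by unfold Spec_enhance_element_classification; infer_instance

-- ===== CLAIM (what is proved, stated in full; the proofs are below) =====
def Claim_equal_enhance_element_classification : Prop := ∀ (element_class : String) (text : String) (bbox : List Int), Dom_enhance_element_classification element_class text bbox → Spec_enhance_element_classification element_class text bbox (enhance_element_classification element_class text bbox)

-- ===== LEMMAS AND PROOFS =====

-- first index of a keyword group matching t (A's ladder shape)
def pvLadder (t : String) : List (List String) → Option Nat
  | [] => none
  | g :: gs => if g.any (fun kw => PySem.Str.isIn kw t) then some 0 else (pvLadder t gs).map (· + 1)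

-- flatten groups into (keyword, priority) pairs, priorities starting at n
def pvFlat : List (List String) → Int → List (String × Int)
  | [], _ => []
  | g :: gs, n => g.map (fun kw => (kw, n)) ++ pvFlat gs (n + 1)

lemma pvFlat_snd_ge (gs : List (List String)) (n : Int) :
    ∀ kp ∈ pvFlat gs n, n ≤ kp.2 := by
  induction gs generalizing n with
  | nil => simp [pvFlat]
  | cons g gs ih =>
    intro kp hkp
    simp only [pvFlat, List.mem_append, List.mem_map] at hkp
    rcases hkp with ⟨kw, _, rfl⟩ | h
    · exact le_refl n
    · have := ih (n + 1) kp h; omega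

lemma pv_foldl_min_const (l : List Int) (a : Int) (h : ∀ x ∈ l, a ≤ x) :
    l.foldl min a = a := by
  induction l with
  | nil => rfl
  | cons x xs ih =>
    simp only [List.foldl_cons]
    have hx : a ≤ x := h x (List.mem_cons_self ..)
    rw [min_eq_left hx]
    exact ih (fun y hy => h y (List.mem_cons_of_mem _ hy))

-- the core: min over the inverted index's matched priorities = first matching group
lemma pv_min_flat (gs : List (List String)) (t : String) (n : Int) :
    PySem.List.min? (((pvFlat gs n).filter (fun kp => PySem.Str.isIn kp.1 t)).map Prod.snd) (fun x => x)
      = (pvLadder t gs).map (fun i => n + i) := by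
  induction gs generalizing n with
  | nil => simp [pvFlat, pvLadder, PySem.List.min?]
  | cons g gs ih =>
    simp only [pvFlat, pvLadder, List.filter_append, List.map_append]
    by_cases h : g.any (fun kw => PySem.Str.isIn kw t)
    · -- first group matches: its hits are a nonempty block of n's, everything later is > n
      rw [if_pos h]
      have hfm : (g.map (fun kw => (kw, n))).filter (fun kp => PySem.Str.isIn kp.1 t)
          = (g.filter (fun kw => PySem.Str.isIn kw t)).map (fun kw => (kw, n)) := by
        rw [List.filter_map]; rfl
      obtain ⟨w, hw, hwt⟩ := List.any_eq_true.mp h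
      have hne : g.filter (fun kw => PySem.Str.isIn kw t) ≠ [] := by
        intro hcon
        exact (List.filter_eq_nil_iff.mp hcon w hw) hwt
      obtain ⟨c, cs, hcs⟩ := List.exists_cons_of_ne_nil hne
      rw [hfm, hcs]
      simp only [List.map_cons, List.map_map, List.cons_append]
      have hsnd : (Prod.snd ∘ fun kw => (kw, n)) = fun _ : String => n := rfl
      rw [hsnd, PySem.List.min?_id_cons]
      have hge : ∀ x ∈ (List.map (fun _ : String => n) cs ++
          ((pvFlat gs (n + 1)).filter (fun kp => PySem.Str.isIn kp.1 t)).map Prod.snd), n ≤ x := by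
        intro x hx
        rcases List.mem_append.mp hx with hx | hx
        · obtain ⟨_, _, rfl⟩ := List.mem_map.mp hx; exact le_refl n
        · obtain ⟨kp, hkp, rfl⟩ := List.mem_map.mp hx
          have := pvFlat_snd_ge gs (n + 1) kp (List.mem_of_mem_filter hkp)
          omega
      rw [pv_foldl_min_const _ _ hge]
      simp
    · -- first group has no matching keyword: its hits are empty
      rw [if_neg h]
      have hnil : (g.map (fun kw => (kw, n))).filter (fun kp => PySem.Str.isIn kp.1 t) = [] := by
        rw [List.filter_map]
        have : g.filter ((fun kp : String × Int => PySem.Str.isIn kp.1 t) ∘ fun kw => (kw, n)) = [] := by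
          apply List.filter_eq_nil_iff.mpr
          intro kw hkw
          have hfalse : (g.any fun kw => PySem.Str.isIn kw t) = false := by simpa using h
          have := List.any_eq_false.mp hfalse kw hkw
          simpa using this
        rw [this]; rfl
      rw [hnil, List.map_nil, List.nil_append, ih (n + 1)]
      cases pvLadder t gs with
      | none => rfl
      | some i => simp; omega

lemma pv_button (t : String) :
    (if (["submit", "login", "sign in", "log in"] : List String).any (fun w => PySem.Str.isIn w t) then "submit_button"
    else if (["cancel", "close", "exit"] : List String).any (fun w => PySem.Str.isIn w t) then "cancel_button"
    else if (["save", "update", "edit"] : List String).any (fun w => PySem.Str.isIn w t) then "save_button"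
    else if (["delete", "remove", "trash"] : List String).any (fun w => PySem.Str.isIn w t) then "delete_button"
    else if (["next", "continue", "proceed"] : List String).any (fun w => PySem.Str.isIn w t) then "next_button"
    else if (["back", "previous", "return"] : List String).any (fun w => PySem.Str.isIn w t) then "back_button"
    else if (["search", "find", "lookup"] : List String).any (fun w => PySem.Str.isIn w t) then "search_button"
    else if (["menu", "hamburger", "☰"] : List String).any (fun w => PySem.Str.isIn w t) then "menu_button"
    else if (["home", "main", "dashboard"] : List String).any (fun w => PySem.Str.isIn w t) then "home_button"
    else if t != "" then "button_" ++ PySem.Str.replace t " " "_"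
    else "generic_button") =
    (match PySem.List.min? ((([("submit", 0), ("login", 0), ("sign in", 0), ("log in", 0),
        ("cancel", 1), ("close", 1), ("exit", 1),
        ("save", 2), ("update", 2), ("edit", 2),
        ("delete", 3), ("remove", 3), ("trash", 3),
        ("next", 4), ("continue", 4), ("proceed", 4),
        ("back", 5), ("previous", 5), ("return", 5),
        ("search", 6), ("find", 6), ("lookup", 6),
        ("menu", 7), ("hamburger", 7), ("☰", 7),
        ("home", 8), ("main", 8), ("dashboard", 8)] : List (String × Int)).filter
          (fun kp => PySem.Str.isIn kp.1 t)).map Prod.snd) (fun x => x) with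
    | some m => (PySem.List.pyGet? ["submit", "cancel", "save", "delete", "next", "back", "search", "menu", "home"] m).getD "" ++ "_" ++ "button"
    | none => if t != "" then "button" ++ "_" ++ PySem.Str.replace t " " "_" else "generic_" ++ "button") := by
  rw [show ([("submit", 0), ("login", 0), ("sign in", 0), ("log in", 0),
        ("cancel", 1), ("close", 1), ("exit", 1),
        ("save", 2), ("update", 2), ("edit", 2),
        ("delete", 3), ("remove", 3), ("trash", 3),
        ("next", 4), ("continue", 4), ("proceed", 4),
        ("back", 5), ("previous", 5), ("return", 5),
        ("search", 6), ("find", 6), ("lookup", 6),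
        ("menu", 7), ("hamburger", 7), ("☰", 7),
        ("home", 8), ("main", 8), ("dashboard", 8)] : List (String × Int)) =
      pvFlat [["submit", "login", "sign in", "log in"], ["cancel", "close", "exit"],
              ["save", "update", "edit"], ["delete", "remove", "trash"],
              ["next", "continue", "proceed"], ["back", "previous", "return"],
              ["search", "find", "lookup"], ["menu", "hamburger", "☰"],
              ["home", "main", "dashboard"]] 0 from by decide]
  rw [pv_min_flat]
  split_ifs with h0 h1 h2 h3 h4 h5 h6 h7 h8 ht <;>
    simp_all only [pvLadder, Bool.not_eq_true, Bool.false_eq_true, if_true, if_false,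
      reduceIte, Option.map_some, Option.map_none] <;>
    rfl

lemma pv_input (t : String) :
    (if (["email", "e-mail", "@"] : List String).any (fun w => PySem.Str.isIn w t) then "email_input"
    else if (["password", "pass", "pwd"] : List String).any (fun w => PySem.Str.isIn w t) then "password_input"
    else if (["username", "user", "login"] : List String).any (fun w => PySem.Str.isIn w t) then "username_input"
    else if (["search", "find", "query"] : List String).any (fun w => PySem.Str.isIn w t) then "search_input"
    else if (["name", "full name"] : List String).any (fun w => PySem.Str.isIn w t) then "name_input"
    else if (["phone", "tel", "mobile"] : List String).any (fun w => PySem.Str.isIn w t) then "phone_input"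
    else if (["address", "street", "city"] : List String).any (fun w => PySem.Str.isIn w t) then "address_input"
    else if t != "" then "input_" ++ PySem.Str.replace t " " "_"
    else "generic_input") =
    (match PySem.List.min? ((([("email", 0), ("e-mail", 0), ("@", 0),
        ("password", 1), ("pass", 1), ("pwd", 1),
        ("username", 2), ("user", 2), ("login", 2),
        ("search", 3), ("find", 3), ("query", 3),
        ("name", 4), ("full name", 4),
        ("phone", 5), ("tel", 5), ("mobile", 5),
        ("address", 6), ("street", 6), ("city", 6)] : List (String × Int)).filter
          (fun kp => PySem.Str.isIn kp.1 t)).map Prod.snd) (fun x => x) with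
    | some m => (PySem.List.pyGet? ["email", "password", "username", "search", "name", "phone", "address"] m).getD "" ++ "_" ++ "input"
    | none => if t != "" then "input" ++ "_" ++ PySem.Str.replace t " " "_" else "generic_" ++ "input") := by
  rw [show ([("email", 0), ("e-mail", 0), ("@", 0),
        ("password", 1), ("pass", 1), ("pwd", 1),
        ("username", 2), ("user", 2), ("login", 2),
        ("search", 3), ("find", 3), ("query", 3),
        ("name", 4), ("full name", 4),
        ("phone", 5), ("tel", 5), ("mobile", 5),
        ("address", 6), ("street", 6), ("city", 6)] : List (String × Int)) =
      pvFlat [["email", "e-mail", "@"], ["password", "pass", "pwd"],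
              ["username", "user", "login"], ["search", "find", "query"],
              ["name", "full name"], ["phone", "tel", "mobile"],
              ["address", "street", "city"]] 0 from by decide]
  rw [pv_min_flat]
  split_ifs with h0 h1 h2 h3 h4 h5 h6 ht <;>
    simp_all only [pvLadder, Bool.not_eq_true, Bool.false_eq_true, if_true, if_false,
      Option.map_some, Option.map_none] <;>
    rfl

lemma pv_link (t : String) :
    (if (["home", "main", "dashboard"] : List String).any (fun w => PySem.Str.isIn w t) then "home_link"
    else if (["about", "info", "help"] : List String).any (fun w => PySem.Str.isIn w t) then "info_link"
    else if (["contact", "support", "help"] : List String).any (fun w => PySem.Str.isIn w t) then "contact_link"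
    else if (["login", "sign in"] : List String).any (fun w => PySem.Str.isIn w t) then "login_link"
    else if (["register", "sign up", "join"] : List String).any (fun w => PySem.Str.isIn w t) then "register_link"
    else if (["profile", "account", "settings"] : List String).any (fun w => PySem.Str.isIn w t) then "profile_link"
    else if t != "" then "link_" ++ PySem.Str.replace t " " "_"
    else "generic_link") =
    (match PySem.List.min? ((([("home", 0), ("main", 0), ("dashboard", 0),
        ("about", 1), ("info", 1), ("help", 1),
        ("contact", 2), ("support", 2),
        ("login", 3), ("sign in", 3),
        ("register", 4), ("sign up", 4), ("join", 4),
        ("profile", 5), ("account", 5), ("settings", 5)] : List (String × Int)).filter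
          (fun kp => PySem.Str.isIn kp.1 t)).map Prod.snd) (fun x => x) with
    | some m => (PySem.List.pyGet? ["home", "info", "contact", "login", "register", "profile"] m).getD "" ++ "_" ++ "link"
    | none => if t != "" then "link" ++ "_" ++ PySem.Str.replace t " " "_" else "generic_" ++ "link") := by
  rw [show ([("home", 0), ("main", 0), ("dashboard", 0),
        ("about", 1), ("info", 1), ("help", 1),
        ("contact", 2), ("support", 2),
        ("login", 3), ("sign in", 3),
        ("register", 4), ("sign up", 4), ("join", 4),
        ("profile", 5), ("account", 5), ("settings", 5)] : List (String × Int)) =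
      pvFlat [["home", "main", "dashboard"], ["about", "info", "help"],
              ["contact", "support"], ["login", "sign in"],
              ["register", "sign up", "join"], ["profile", "account", "settings"]] 0 from by decide]
  rw [pv_min_flat]
  -- A's contact rule also lists "help", but the preceding info rule lists "help" too, so the
  -- contact rule effectively fires on "contact"/"support" only; the inverted index records that.
  by_cases h0 : (["home", "main", "dashboard"] : List String).any (fun w => PySem.Str.isIn w t) = true
  · simp only [pvLadder, h0, if_true]
    rfl
  · have h0' : (["home", "main", "dashboard"] : List String).any (fun w => PySem.Str.isIn w t) = false := by
      simpa using h0
    by_cases h1 : (["about", "info", "help"] : List String).any (fun w => PySem.Str.isIn w t) = true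
    · simp only [pvLadder, h0', Bool.false_eq_true, if_false, h1, if_true]
      rfl
    · have h1' : (["about", "info", "help"] : List String).any (fun w => PySem.Str.isIn w t) = false := by
        simpa using h1
      have hhelp : PySem.Str.isIn "help" t = false := by
        simp only [List.any_cons, List.any_nil, Bool.or_eq_false_iff] at h1'
        exact h1'.2.2.1
      have h2eq : (["contact", "support", "help"] : List String).any (fun w => PySem.Str.isIn w t)
          = (["contact", "support"] : List String).any (fun w => PySem.Str.isIn w t) := by
        simp only [List.any_cons, List.any_nil, hhelp, Bool.or_false]
      rw [h2eq]
      by_cases h2 : (["contact", "support"] : List String).any (fun w => PySem.Str.isIn w t) = true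
      · simp only [pvLadder, h0', h1', Bool.false_eq_true, if_false, h2, if_true]
        rfl
      · have h2' : (["contact", "support"] : List String).any (fun w => PySem.Str.isIn w t) = false := by
          simpa using h2
        by_cases h3 : (["login", "sign in"] : List String).any (fun w => PySem.Str.isIn w t) = true
        · simp only [pvLadder, h0', h1', h2', Bool.false_eq_true, if_false, h3, if_true]
          rfl
        · have h3' : (["login", "sign in"] : List String).any (fun w => PySem.Str.isIn w t) = false := by
            simpa using h3
          by_cases h4 : (["register", "sign up", "join"] : List String).any (fun w => PySem.Str.isIn w t) = true
          · simp only [pvLadder, h0', h1', h2', h3', Bool.false_eq_true, if_false, h4, if_true]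
            rfl
          · have h4' : (["register", "sign up", "join"] : List String).any (fun w => PySem.Str.isIn w t) = false := by
              simpa using h4
            by_cases h5 : (["profile", "account", "settings"] : List String).any (fun w => PySem.Str.isIn w t) = true
            · simp only [pvLadder, h0', h1', h2', h3', h4', Bool.false_eq_true, if_false, h5, if_true]
              rfl
            · have h5' : (["profile", "account", "settings"] : List String).any (fun w => PySem.Str.isIn w t) = false := by
                simpa using h5
              simp only [pvLadder, h0', h1', h2', h3', h4', h5', Bool.false_eq_true, if_false]
              rfl

lemma pv_heading (t : String) :
    (if (["welcome", "hello", "hi"] : List String).any (fun w => PySem.Str.isIn w t) then "welcome_heading"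
    else if (["login", "sign in"] : List String).any (fun w => PySem.Str.isIn w t) then "login_heading"
    else if (["register", "sign up"] : List String).any (fun w => PySem.Str.isIn w t) then "register_heading"
    else if (["profile", "account"] : List String).any (fun w => PySem.Str.isIn w t) then "profile_heading"
    else if (["settings", "preferences"] : List String).any (fun w => PySem.Str.isIn w t) then "settings_heading"
    else if t != "" then "heading_" ++ PySem.Str.replace t " " "_"
    else "generic_heading") =
    (match PySem.List.min? ((([("welcome", 0), ("hello", 0), ("hi", 0),
        ("login", 1), ("sign in", 1),
        ("register", 2), ("sign up", 2),
        ("profile", 3), ("account", 3),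
        ("settings", 4), ("preferences", 4)] : List (String × Int)).filter
          (fun kp => PySem.Str.isIn kp.1 t)).map Prod.snd) (fun x => x) with
    | some m => (PySem.List.pyGet? ["welcome", "login", "register", "profile", "settings"] m).getD "" ++ "_" ++ "heading"
    | none => if t != "" then "heading" ++ "_" ++ PySem.Str.replace t " " "_" else "generic_" ++ "heading") := by
  rw [show ([("welcome", 0), ("hello", 0), ("hi", 0),
        ("login", 1), ("sign in", 1),
        ("register", 2), ("sign up", 2),
        ("profile", 3), ("account", 3),
        ("settings", 4), ("preferences", 4)] : List (String × Int)) =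
      pvFlat [["welcome", "hello", "hi"], ["login", "sign in"], ["register", "sign up"],
              ["profile", "account"], ["settings", "preferences"]] 0 from by decide]
  rw [pv_min_flat]
  split_ifs with h0 h1 h2 h3 h4 ht <;>
    simp_all only [pvLadder, Bool.not_eq_true, Bool.false_eq_true, if_true, if_false,
      Option.map_some, Option.map_none] <;>
    rfl

-- ===== VERDICT (by name: the statement is the Claim_ definition above) =====
set_option maxHeartbeats 2000000 in
theorem enhance_element_classification_spec : Claim_equal_enhance_element_classification := by
  intro ec text bbox _
  unfold Spec_enhance_element_classification
  by_cases h1 : ec = "button"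
  · subst h1
    unfold enhance_element_classification enhance_element_classification_alt
    rw [show PySem.Dict.get? pvRules "button" = some
      ("button",
       [("submit", 0), ("login", 0), ("sign in", 0), ("log in", 0),
        ("cancel", 1), ("close", 1), ("exit", 1),
        ("save", 2), ("update", 2), ("edit", 2),
        ("delete", 3), ("remove", 3), ("trash", 3),
        ("next", 4), ("continue", 4), ("proceed", 4),
        ("back", 5), ("previous", 5), ("return", 5),
        ("search", 6), ("find", 6), ("lookup", 6),
        ("menu", 7), ("hamburger", 7), ("☰", 7),
        ("home", 8), ("main", 8), ("dashboard", 8)],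
       ["submit", "cancel", "save", "delete", "next", "back", "search", "menu", "home"]) from rfl]
    simp only [show (("button" : String) == "button") = true from rfl, if_true]
    exact pv_button (PySem.Str.strip (PySem.Str.lower text))
  · by_cases h2 : ec = "textbox" ∨ ec = "input"
    · have hbtn : (ec == "button") = false := beq_eq_false_iff_ne.mpr h1
      have hor : (ec == "textbox" || ec == "input") = true := by
        rcases h2 with h | h <;> subst h <;> rfl
      have hget : PySem.Dict.get? pvRules ec = some
        ("input",
         [("email", 0), ("e-mail", 0), ("@", 0),
          ("password", 1), ("pass", 1), ("pwd", 1),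
          ("username", 2), ("user", 2), ("login", 2),
          ("search", 3), ("find", 3), ("query", 3),
          ("name", 4), ("full name", 4),
          ("phone", 5), ("tel", 5), ("mobile", 5),
          ("address", 6), ("street", 6), ("city", 6)],
         ["email", "password", "username", "search", "name", "phone", "address"]) := by
        rcases h2 with h | h <;> subst h <;> rfl
      unfold enhance_element_classification enhance_element_classification_alt
      rw [hget]
      simp only [hbtn, Bool.false_eq_true, if_false, hor, if_true]
      exact pv_input (PySem.Str.strip (PySem.Str.lower text))
    · push Not at h2
      obtain ⟨h2a, h2b⟩ := h2
      by_cases h4 : ec = "link"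
      · subst h4
        unfold enhance_element_classification enhance_element_classification_alt
        rw [show PySem.Dict.get? pvRules "link" = some
          ("link",
           [("home", 0), ("main", 0), ("dashboard", 0),
            ("about", 1), ("info", 1), ("help", 1),
            ("contact", 2), ("support", 2),
            ("login", 3), ("sign in", 3),
            ("register", 4), ("sign up", 4), ("join", 4),
            ("profile", 5), ("account", 5), ("settings", 5)],
           ["home", "info", "contact", "login", "register", "profile"]) from rfl]
        simp only [show (("link" : String) == "button") = false from rfl,
          show (("link" : String) == "textbox") = false from rfl,
          show (("link" : String) == "input") = false from rfl,
          show (("link" : String) == "link") = true from rfl,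
          Bool.false_eq_true, Bool.or_self, if_false, if_true]
        exact pv_link (PySem.Str.strip (PySem.Str.lower text))
      · by_cases h5 : ec = "heading"
        · subst h5
          unfold enhance_element_classification enhance_element_classification_alt
          rw [show PySem.Dict.get? pvRules "heading" = some
            ("heading",
             [("welcome", 0), ("hello", 0), ("hi", 0),
              ("login", 1), ("sign in", 1),
              ("register", 2), ("sign up", 2),
              ("profile", 3), ("account", 3),
              ("settings", 4), ("preferences", 4)],
             ["welcome", "login", "register", "profile", "settings"]) from rfl]
          simp only [show (("heading" : String) == "button") = false from rfl,
            show (("heading" : String) == "textbox") = false from rfl,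
            show (("heading" : String) == "input") = false from rfl,
            show (("heading" : String) == "link") = false from rfl,
            show (("heading" : String) == "heading") = true from rfl,
            Bool.false_eq_true, Bool.or_self, if_false, if_true]
          exact pv_heading (PySem.Str.strip (PySem.Str.lower text))
        · have b1 : ("button" == ec) = false := beq_eq_false_iff_ne.mpr (Ne.symm h1)
          have b2 : ("textbox" == ec) = false := beq_eq_false_iff_ne.mpr (Ne.symm h2a)
          have b3 : ("input" == ec) = false := beq_eq_false_iff_ne.mpr (Ne.symm h2b)
          have b4 : ("link" == ec) = false := beq_eq_false_iff_ne.mpr (Ne.symm h4)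
          have b5 : ("heading" == ec) = false := beq_eq_false_iff_ne.mpr (Ne.symm h5)
          have a1 : (ec == "button") = false := beq_eq_false_iff_ne.mpr h1
          have a2 : (ec == "textbox") = false := beq_eq_false_iff_ne.mpr h2a
          have a3 : (ec == "input") = false := beq_eq_false_iff_ne.mpr h2b
          have a4 : (ec == "link") = false := beq_eq_false_iff_ne.mpr h4
          have a5 : (ec == "heading") = false := beq_eq_false_iff_ne.mpr h5
          unfold enhance_element_classification enhance_element_classification_alt
          rw [show pvRules = PySem.Dict.mk pvRules.items from rfl]
          simp only [pvRules, PySem.Dict.get?_mk_cons, b1, b2, b3, b4, b5,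
            a1, a2, a3, a4, a5, Bool.false_eq_true, Bool.false_or, reduceIte]
          simp [PySem.Dict.get?]
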